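-- pv_equiv track=rewrite | github.com/jdlee6/AoC | aoc4/D4_Part1.py | conditionals
-- ===== SOURCE A (Python) =====
-- def conditionals(num):
--     '''
--     checks for double
--     then checks current digit > prev digit
--     if all pass, then increment
--     '''
--     str_num = str(num)
--     prevDigit = str_num[0]
--     double = False
--
--     for i in range(len(str_num)-1):
--         if str_num[i+1] == prevDigit:
--             double = True
--         elif str_num[i+1] < prevDigit:
--             return False
--         else:
--             prevDigit = str_num[i+1]
--
--     return double
-- ===== SOURCE B (Python) =====
-- def conditionals(num):
--     s = str(num)
--     return list(s) == sorted(s) and len(set(s)) < len(s)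
-- ===== Notes on version B (the rewrite author's own statement) =====
-- stated objective: idiomatic
-- what changed: Replaces the early-exit scan with prev/double flags by two whole-string tests: monotonicity via list(s) == sorted(s), then a repeated character via len(set(s)) < len(s), which under monotonicity is exactly an adjacent double.
import Mathlib
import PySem

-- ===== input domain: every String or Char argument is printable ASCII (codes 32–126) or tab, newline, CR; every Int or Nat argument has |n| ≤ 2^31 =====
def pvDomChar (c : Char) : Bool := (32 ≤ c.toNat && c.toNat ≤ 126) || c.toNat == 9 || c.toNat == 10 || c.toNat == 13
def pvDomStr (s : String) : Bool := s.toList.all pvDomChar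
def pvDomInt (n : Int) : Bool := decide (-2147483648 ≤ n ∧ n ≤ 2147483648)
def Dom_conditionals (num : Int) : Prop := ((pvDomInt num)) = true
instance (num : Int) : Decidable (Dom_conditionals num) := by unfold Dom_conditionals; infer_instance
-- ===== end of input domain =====

-- B replaces A's early-exit flag-scan by two whole-string tests (list(s) == sorted(s), then len(set(s)) < len(s)); idiomatic, not faster.


-- ===== PORT A =====
-- the for-loop over str_num[1:], carrying prevDigit and the double flag, with early return False
def condLoop (prev : Char) (double : Bool) : List Char → Bool
  | [] => double
  | c :: rest =>
    if c == prev then condLoop prev true rest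
    else if c < prev then false
    else condLoop c double rest

def conditionals (num : Int) : Bool :=
  match (PySem.Int.toStr num).toList with
  | [] => false  -- unreachable: str(num) is never the empty string
  | prev :: rest => condLoop prev false rest

-- ===== PORT B =====
def conditionals_alt (num : Int) : Bool :=
  let s := (PySem.Int.toStr num).toList
  (s == PySem.List.sorted s (fun x => x)) && decide ((PySem.Set.ofList s).length < s.length)

-- ===== PRECONDITION & SPEC =====
def Spec_conditionals (num : Int) (out : Bool) : Prop := out = conditionals_alt num
instance (num : Int) (out : Bool) : Decidable (Spec_conditionals num out) := by unfold Spec_conditionals; infer_instance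

-- ===== CLAIM (what is proved, stated in full; the proofs are below) =====
def Claim_equal_conditionals : Prop := ∀ (num : Int), Dom_conditionals num → Spec_conditionals num (conditionals num)

-- ===== LEMMAS AND PROOFS =====

/-- does the list contain two equal adjacent elements? -/
def hasAdjDup : List Char → Bool
  | a :: b :: t => (a == b) || hasAdjDup (b :: t)
  | _ => false

theorem condLoop_eq (t : List Char) : ∀ (prev : Char) (double : Bool),
    condLoop prev double t
      = (decide (List.IsChain (· ≤ ·) (prev :: t)) && (double || hasAdjDup (prev :: t))) := by
  induction t with
  | nil => intro prev double; simp [condLoop, hasAdjDup]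
  | cons c rest ih =>
    intro prev double
    by_cases h : c = prev
    · subst h
      simp [condLoop, ih, hasAdjDup, List.isChain_cons_cons]
    · by_cases hlt : c < prev
      · have : ¬ prev ≤ c := not_le.mpr hlt
        simp [condLoop, h, hlt, List.isChain_cons_cons, this]
      · have hle : prev ≤ c := le_of_not_gt hlt
        have hbeq : (c == prev) = false := by simp [h]
        have hne : (prev == c) = false := by simp [Ne.symm h]
        simp [condLoop, hbeq, hlt, ih, hasAdjDup, hne, List.isChain_cons_cons, hle]

theorem adjdup_of_mem_head {a b : Char} {t : List Char}
    (hp : List.Pairwise (· ≤ ·) (a :: b :: t)) (hm : a ∈ b :: t) : a = b := by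
  rcases List.pairwise_cons.mp hp with ⟨h1, hp2⟩
  rcases List.mem_cons.mp hm with h | h
  · exact h
  · rcases List.pairwise_cons.mp hp2 with ⟨h2, _⟩
    exact le_antisymm (h1 b (by simp)) (h2 a h)

theorem hasAdjDup_iff_not_nodup : ∀ (l : List Char),
    List.Pairwise (· ≤ ·) l → (hasAdjDup l = true ↔ ¬ l.Nodup)
  | [] => by simp [hasAdjDup]
  | [a] => by simp [hasAdjDup]
  | a :: b :: t => by
    intro hp
    have hp' : List.Pairwise (· ≤ ·) (b :: t) := hp.tail
    constructor
    · intro h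
      simp only [hasAdjDup, Bool.or_eq_true, beq_iff_eq] at h
      rcases h with h | h
      · subst h; simp
      · have := (hasAdjDup_iff_not_nodup (b :: t) hp').mp h
        exact fun hnd => this hnd.of_cons
    · intro h
      simp only [hasAdjDup, Bool.or_eq_true, beq_iff_eq]
      by_cases hm : a ∈ b :: t
      · exact Or.inl (adjdup_of_mem_head hp hm)
      · refine Or.inr ((hasAdjDup_iff_not_nodup (b :: t) hp').mpr ?_)
        exact fun hnd => h (List.nodup_cons.mpr ⟨hm, hnd⟩)

theorem foldl_add_length_le (l : List Char) : ∀ (s : PySem.Set Char),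
    (List.foldl PySem.Set.add s l).length ≤ s.length + l.length := by
  induction l with
  | nil => intro s; simp
  | cons a t ih =>
    intro s
    have hadd : (PySem.Set.add s a).length ≤ s.length + 1 := by
      unfold PySem.Set.add; split <;> simp
    calc (List.foldl PySem.Set.add s (a :: t)).length
        = (List.foldl PySem.Set.add (PySem.Set.add s a) t).length := by simp [List.foldl]
      _ ≤ (PySem.Set.add s a).length + t.length := ih _
      _ ≤ s.length + (a :: t).length := by simp; omega

theorem foldl_add_length_lt_of_mem (l : List Char) : ∀ (s : PySem.Set Char) (x : Char),
    x ∈ s → x ∈ l → (List.foldl PySem.Set.add s l).length < s.length + l.length := by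
  induction l with
  | nil => intro s x _ hxl; simp at hxl
  | cons b t ih =>
    intro s x hxs hxl
    rcases List.mem_cons.mp hxl with h | h
    · subst h
      have hc : s.contains x = true := by
        simp only [PySem.Set.contains, List.contains_eq_mem]
        exact decide_eq_true hxs
      have : PySem.Set.add s x = s := by unfold PySem.Set.add; rw [if_pos hc]
      calc (List.foldl PySem.Set.add s (x :: t)).length
          = (List.foldl PySem.Set.add s t).length := by simp [List.foldl, this]
        _ ≤ s.length + t.length := foldl_add_length_le t s
        _ < s.length + (x :: t).length := by simp
    · have hxadd : x ∈ PySem.Set.add s b := by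
        unfold PySem.Set.add; split
        · exact hxs
        · exact List.mem_append_left _ hxs
      have hlen : (PySem.Set.add s b).length ≤ s.length + 1 := by
        unfold PySem.Set.add; split <;> simp
      calc (List.foldl PySem.Set.add s (b :: t)).length
          = (List.foldl PySem.Set.add (PySem.Set.add s b) t).length := by simp [List.foldl]
        _ < (PySem.Set.add s b).length + t.length := ih _ x hxadd h
        _ ≤ s.length + (b :: t).length := by simp; omega

theorem foldl_add_length_lt_of_not_nodup (l : List Char) : ∀ (s : PySem.Set Char),
    ¬ l.Nodup → (List.foldl PySem.Set.add s l).length < s.length + l.length := by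
  induction l with
  | nil => intro s h; simp at h
  | cons a t ih =>
    intro s h
    simp only [List.nodup_cons, not_and_or, not_not] at h
    have hlen : (PySem.Set.add s a).length ≤ s.length + 1 := by
      unfold PySem.Set.add; split <;> simp
    rcases h with h | h
    · have ha : a ∈ PySem.Set.add s a := by
        unfold PySem.Set.add; split
        · rename_i hc
          simpa [PySem.Set.contains, List.contains_eq_mem] using hc
        · exact List.mem_append_right _ (by simp)
      calc (List.foldl PySem.Set.add s (a :: t)).length
          = (List.foldl PySem.Set.add (PySem.Set.add s a) t).length := by simp [List.foldl]
        _ < (PySem.Set.add s a).length + t.length := foldl_add_length_lt_of_mem t _ a ha h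
        _ ≤ s.length + (a :: t).length := by simp; omega
    · calc (List.foldl PySem.Set.add s (a :: t)).length
          = (List.foldl PySem.Set.add (PySem.Set.add s a) t).length := by simp [List.foldl]
        _ < (PySem.Set.add s a).length + t.length := ih _ h
        _ ≤ s.length + (a :: t).length := by simp; omega

theorem ofList_eq_self_of_nodup : ∀ (l : List Char) (s : PySem.Set Char),
    (∀ x ∈ l, x ∉ s) → l.Nodup → List.foldl PySem.Set.add s l = s ++ l
  | [], s, _, _ => by simp
  | a :: t, s, hdisj, hnd => by
    have ha : a ∉ s := hdisj a (by simp)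
    have hc : s.contains a = false := by
      simp only [PySem.Set.contains, List.contains_eq_mem]
      exact decide_eq_false ha
    have hadd : PySem.Set.add s a = s ++ [a] := by unfold PySem.Set.add; rw [if_neg (by rw [hc]; simp)]
    have hrec : List.foldl PySem.Set.add (s ++ [a]) t = (s ++ [a]) ++ t := by
      apply ofList_eq_self_of_nodup t (s ++ [a])
      · intro x hx
        simp only [List.mem_append, List.mem_singleton, not_or]
        exact ⟨hdisj x (by simp [hx]), fun he => (List.nodup_cons.mp hnd).1 (he ▸ hx)⟩
      · exact (List.nodup_cons.mp hnd).2
    simp [List.foldl, hadd, hrec]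

theorem ofList_length_lt_iff (l : List Char) :
    ((PySem.Set.ofList l).length < l.length ↔ ¬ l.Nodup) := by
  constructor
  · intro h hnd
    have := ofList_eq_self_of_nodup l PySem.Set.empty (by simp [PySem.Set.empty]) hnd
    rw [PySem.Set.ofList_eq_foldl] at h
    simp [PySem.Set.empty] at this
    rw [this] at h
    omega
  · intro h
    have := foldl_add_length_lt_of_not_nodup l PySem.Set.empty h
    rw [PySem.Set.ofList_eq_foldl]
    simpa [PySem.Set.empty] using this

theorem main_list_lemma (l : List Char) :
    (match l with
      | [] => false
      | prev :: rest => condLoop prev false rest)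
      = ((l == PySem.List.sorted l (fun x => x)) && decide ((PySem.Set.ofList l).length < l.length)) := by
  match l with
  | [] => simp [PySem.List.sorted, PySem.Set.ofList, PySem.Set.empty]
  | prev :: rest =>
    by_cases hp : List.Pairwise (· ≤ ·) (prev :: rest)
    · have hsorted : PySem.List.sorted (prev :: rest) (fun x => x) = prev :: rest :=
        PySem.List.sorted_eq_self_of_pairwise _ _ hp
      have hchain : List.IsChain (· ≤ ·) (prev :: rest) := by
        exact List.isChain_iff_pairwise.mpr hp
      show condLoop prev false rest = _
      rw [condLoop_eq]
      simp only [hsorted, hchain, decide_true, Bool.true_and, Bool.false_or, beq_self_eq_true]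
      rw [Bool.eq_iff_iff]
      simp only [decide_eq_true_eq]
      rw [ofList_length_lt_iff]
      exact hasAdjDup_iff_not_nodup (prev :: rest) hp
    · have hchain : ¬ List.IsChain (· ≤ ·) (prev :: rest) := fun h =>
        hp (List.isChain_iff_pairwise.mp h)
      have hne : ((prev :: rest) == PySem.List.sorted (prev :: rest) (fun x => x)) = false := by
        rw [beq_eq_false_iff_ne]
        intro he
        exact hp (by rw [he]; exact PySem.List.sorted_pairwise _ _)
      show condLoop prev false rest = _
      rw [condLoop_eq]
      simp [hchain, hne]

-- ===== VERDICT (by name: the statement is the Claim_ definition above) =====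
theorem conditionals_spec : Claim_equal_conditionals := by
  intro num _
  unfold Spec_conditionals conditionals conditionals_alt
  exact main_list_lemma (PySem.Int.toStr num).toList
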